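-- pv_equiv track=rewrite | github.com/POO-2024-01-UNALMED/pr-ctica-2-python-group-2-team-6 | tareatlp.py | actualizar_cantidad
-- ===== SOURCE A (Python) =====
-- def actualizar_cantidad(biodiversidad, especie, nueva_cantidad, resultado=None):
--     if resultado is None:
--         resultado = {}
--     if not biodiversidad:
--         return resultado
--     especie_actual, info = list(biodiversidad.items())[0]
--     nueva_info = (info[0], nueva_cantidad if especie_actual == especie else info[1], info[2])
--     resultado[especie_actual] = nueva_info
--     return actualizar_cantidad(dict(list(biodiversidad.items())[1:]), especie, nueva_cantidad, resultado)
-- ===== SOURCE B (Python) =====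
-- def actualizar_cantidad(biodiversidad, especie, nueva_cantidad, resultado=None):
--     resultado = {} if resultado is None else resultado
--     for especie_actual, info in biodiversidad.items():
--         resultado[especie_actual] = (info[0],
--                                      nueva_cantidad if especie_actual == especie else info[1],
--                                      info[2])
--     return resultado
-- ===== Notes on version B (the rewrite author's own statement) =====
-- stated objective: faster
-- what changed: Replaces A's recursion that rebuilds a fresh dict from the tail at every step with a single iterative pass over the items inserting into the accumulator.
-- outside the precondition, e.g. on actualizar_cantidad({'a': (1,)}, 'a', 5, None): A raises IndexError, B raises IndexError
import Mathlib
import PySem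

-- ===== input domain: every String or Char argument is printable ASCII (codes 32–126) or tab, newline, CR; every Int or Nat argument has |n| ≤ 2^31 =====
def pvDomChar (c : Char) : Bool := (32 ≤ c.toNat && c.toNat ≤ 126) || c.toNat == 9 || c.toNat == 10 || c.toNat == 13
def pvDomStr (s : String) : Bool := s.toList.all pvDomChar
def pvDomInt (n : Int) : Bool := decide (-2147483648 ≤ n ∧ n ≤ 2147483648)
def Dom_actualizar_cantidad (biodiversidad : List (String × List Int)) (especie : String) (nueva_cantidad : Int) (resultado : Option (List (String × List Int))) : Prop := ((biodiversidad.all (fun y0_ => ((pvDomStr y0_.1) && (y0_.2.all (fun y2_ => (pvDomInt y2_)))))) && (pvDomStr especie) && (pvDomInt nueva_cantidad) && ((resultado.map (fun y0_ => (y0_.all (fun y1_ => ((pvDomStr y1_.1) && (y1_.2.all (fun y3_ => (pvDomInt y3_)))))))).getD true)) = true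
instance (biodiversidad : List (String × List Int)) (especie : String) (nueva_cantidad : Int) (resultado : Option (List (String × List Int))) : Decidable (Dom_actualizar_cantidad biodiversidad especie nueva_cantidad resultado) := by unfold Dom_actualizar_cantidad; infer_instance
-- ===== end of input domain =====

-- B replaces A's recursion (which rebuilds a dict from the tail at every step) by one
-- iterative pass inserting into the accumulator dict; objective: simpler.
-- Return-value equivalence only: both Pythons mutate a caller-supplied `resultado` in place.

-- ===== PORT A =====
def actualizar_cantidad (biodiversidad : List (String × List Int)) (especie : String) (nueva_cantidad : Int) (resultado : Option (List (String × List Int))) : List (String × List Int) :=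
  -- if resultado is None: resultado = {}
  let r : PySem.Dict String (List Int) := ⟨resultado.getD []⟩
  match biodiversidad with
  | [] => r.items
  | (especie_actual, info) :: rest =>
    -- Pre_ guarantees len(info) ≥ 3, so pyGetD is exact for info[0], info[1], info[2]
    let nueva_info : List Int :=
      [PySem.List.pyGetD info 0 0,
       if especie_actual == especie then nueva_cantidad else PySem.List.pyGetD info 1 0,
       PySem.List.pyGetD info 2 0]
    actualizar_cantidad rest especie nueva_cantidad (some ((r.insert especie_actual nueva_info).items))

-- ===== PORT B =====
def actualizar_cantidad_alt (biodiversidad : List (String × List Int)) (especie : String) (nueva_cantidad : Int) (resultado : Option (List (String × List Int))) : List (String × List Int) :=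
  (biodiversidad.foldl
    (fun (acc : PySem.Dict String (List Int)) p =>
      acc.insert p.1
        [PySem.List.pyGetD p.2 0 0,
         if p.1 == especie then nueva_cantidad else PySem.List.pyGetD p.2 1 0,
         PySem.List.pyGetD p.2 2 0])
    ⟨resultado.getD []⟩).items

-- ===== PRECONDITION & SPEC =====
-- Pre_ excludes exactly the inputs on which A raises IndexError: a species whose info
-- list has fewer than 3 entries (info[0]/info[1]/info[2] are read).
def Pre_actualizar_cantidad (biodiversidad : List (String × List Int)) (especie : String) (nueva_cantidad : Int) (resultado : Option (List (String × List Int))) : Prop :=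
  ∀ p ∈ biodiversidad, 3 ≤ p.2.length
instance (biodiversidad : List (String × List Int)) (especie : String) (nueva_cantidad : Int) (resultado : Option (List (String × List Int))) : Decidable (Pre_actualizar_cantidad biodiversidad especie nueva_cantidad resultado) := by unfold Pre_actualizar_cantidad; infer_instance

def pvWitness_actualizar_cantidad : (List (String × List Int)) × String × Int × (Option (List (String × List Int))) :=
  ([("loro", [2, 7, 1]), ("puma", [1, 3, 0])], "puma", 9, none)

def Spec_actualizar_cantidad (biodiversidad : List (String × List Int)) (especie : String) (nueva_cantidad : Int) (resultado : Option (List (String × List Int))) (out : List (String × List Int)) : Prop := out = actualizar_cantidad_alt biodiversidad especie nueva_cantidad resultado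
instance (biodiversidad : List (String × List Int)) (especie : String) (nueva_cantidad : Int) (resultado : Option (List (String × List Int))) (out : List (String × List Int)) : Decidable (Spec_actualizar_cantidad biodiversidad especie nueva_cantidad resultado out) := by unfold Spec_actualizar_cantidad; infer_instance

-- ===== CLAIM (what is proved, stated in full; the proofs are below) =====
def Claim_equal_actualizar_cantidad : Prop := ∀ (biodiversidad : List (String × List Int)) (especie : String) (nueva_cantidad : Int) (resultado : Option (List (String × List Int))), Dom_actualizar_cantidad biodiversidad especie nueva_cantidad resultado → Pre_actualizar_cantidad biodiversidad especie nueva_cantidad resultado → Spec_actualizar_cantidad biodiversidad especie nueva_cantidad resultado (actualizar_cantidad biodiversidad especie nueva_cantidad resultado)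

-- ===== LEMMAS AND PROOFS =====
theorem actualizar_cantidad_eq_foldl (especie : String) (nueva_cantidad : Int) :
    ∀ (biodiversidad : List (String × List Int)) (resultado : Option (List (String × List Int))),
      actualizar_cantidad biodiversidad especie nueva_cantidad resultado
        = actualizar_cantidad_alt biodiversidad especie nueva_cantidad resultado := by
  intro bio
  induction bio with
  | nil => intro res; rfl
  | cons hd tl ih =>
    intro res
    obtain ⟨k, info⟩ := hd
    rw [actualizar_cantidad, ih]
    rfl

-- ===== VERDICT (by name: the statement is the Claim_ definition above) =====
theorem actualizar_cantidad_spec : Claim_equal_actualizar_cantidad := by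
  intro bio esp nc res _ _
  exact actualizar_cantidad_eq_foldl esp nc bio res
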